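-- pv_equiv track=rewrite | github.com/dean571/-veritas-snyder-preval-public | conformance_harness.py | contains_repeated_hex
-- ===== SOURCE A (Python) =====
-- REPEATED_HEX_PATTERN_LEN = 32  # look for any 32-hex substring repeated twice consecutively
--
-- def contains_repeated_hex(text):
--     """Return True if any 32‑hex substring appears twice consecutively."""
--     # Convert text to lowercase hex characters only
--     hex_chars = ''.join(c for c in text.lower() if c in '0123456789abcdef')
--     # Scan for repeated 32‑hex chunks
--     for i in range(len(hex_chars) - 2*REPEATED_HEX_PATTERN_LEN + 1):
--         chunk1 = hex_chars[i:i+REPEATED_HEX_PATTERN_LEN]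
--         chunk2 = hex_chars[i+REPEATED_HEX_PATTERN_LEN:i+2*REPEATED_HEX_PATTERN_LEN]
--         if chunk1 == chunk2:
--             return True
--     return False
-- ===== SOURCE B (Python) =====
-- REPEATED_HEX_PATTERN_LEN = 32
--
-- def contains_repeated_hex(text):
--     """Return True if any 32-hex substring appears twice consecutively."""
--     hex_chars = [c for c in text.lower() if c in '0123456789abcdef']
--     # One pass: a 32-hex chunk repeats consecutively iff there are 32
--     # consecutive positions j with hex_chars[j] == hex_chars[j + 32].
--     run = 0
--     for a, b in zip(hex_chars, hex_chars[REPEATED_HEX_PATTERN_LEN:]):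
--         if a == b:
--             run += 1
--             if run == REPEATED_HEX_PATTERN_LEN:
--                 return True
--         else:
--             run = 0
--     return False
-- ===== Notes on version B (the rewrite author's own statement) =====
-- stated objective: faster
-- what changed: Replaces the sliding-window loop that slices and compares two fresh 32-char chunks at every start position with a single pass over zip(hex, hex[32:]) maintaining a run counter of consecutive positions where hex[j] == hex[j+32]; a run of length 32 is exactly a consecutively repeated 32-hex chunk.
import Mathlib
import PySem

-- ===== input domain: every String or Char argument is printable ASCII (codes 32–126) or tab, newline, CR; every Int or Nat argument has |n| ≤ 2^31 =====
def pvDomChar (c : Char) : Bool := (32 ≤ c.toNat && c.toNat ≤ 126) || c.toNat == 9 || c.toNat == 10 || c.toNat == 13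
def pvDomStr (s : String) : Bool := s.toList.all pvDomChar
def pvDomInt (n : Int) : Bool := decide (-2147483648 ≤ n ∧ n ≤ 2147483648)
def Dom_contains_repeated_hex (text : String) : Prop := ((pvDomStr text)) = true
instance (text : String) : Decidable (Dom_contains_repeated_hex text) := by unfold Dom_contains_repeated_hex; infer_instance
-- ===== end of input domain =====

-- B replaces A's per-position 32-char slice comparison with a one-pass run counter
-- over zip(hex, hex[32:]) (objective: faster by a constant factor).

-- ===== PORT A =====
-- REPEATED_HEX_PATTERN_LEN = 32 (module constant, inlined as the literals 32 and 64 = 2*32)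
def contains_repeated_hex (text : String) : Bool :=
  let hexChars : List Char :=
    (PySem.Str.lower text).toList.filter (fun c => ("0123456789abcdef".toList).contains c)
  (PySem.List.pyRange 0 ((hexChars.length : Int) - 64 + 1) 1).any (fun i =>
    PySem.List.slice hexChars (some i) (some (i + 32)) =
      PySem.List.slice hexChars (some (i + 32)) (some (i + 64)))

-- ===== PORT B =====
-- the for-loop with the run counter and early return
def pvRunLoop : List (Char × Char) → Nat → Bool
  | [], _ => false
  | (a, b) :: ps, run =>
    if a = b then
      if run + 1 = 32 then true else pvRunLoop ps (run + 1)
    else pvRunLoop ps 0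

def contains_repeated_hex_alt (text : String) : Bool :=
  let hexChars : List Char :=
    (PySem.Str.lower text).toList.filter (fun c => ("0123456789abcdef".toList).contains c)
  pvRunLoop (hexChars.zip (hexChars.drop 32)) 0

-- ===== PRECONDITION & SPEC =====
def Spec_contains_repeated_hex (text : String) (out : Bool) : Prop := out = contains_repeated_hex_alt text
instance (text : String) (out : Bool) : Decidable (Spec_contains_repeated_hex text out) := by unfold Spec_contains_repeated_hex; infer_instance

-- ===== CLAIM (what is proved, stated in full; the proofs are below) =====
def Claim_equal_contains_repeated_hex : Prop := ∀ (text : String), Dom_contains_repeated_hex text → Spec_contains_repeated_hex text (contains_repeated_hex text)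

-- ===== LEMMAS AND PROOFS =====

-- pair m of the zipped list matches
def pvMch (p : List (Char × Char)) (m : Nat) : Prop := ∃ c, p[m]? = some (c, c)

-- a full window of 32 matching pairs starting at i
def pvWin (p : List (Char × Char)) (i : Nat) : Prop := i + 32 ≤ p.length ∧ ∀ j < 32, pvMch p (i + j)

-- the first 32 - r pairs all match (completing a run already of length r)
def pvHead (p : List (Char × Char)) (r : Nat) : Prop := 32 - r ≤ p.length ∧ ∀ j < 32 - r, pvMch p j

theorem pvMch_cons_zero (a b : Char) (ps : List (Char × Char)) : pvMch ((a, b) :: ps) 0 ↔ a = b := by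
  simp [pvMch, eq_comm]

theorem pvMch_cons_succ (q : Char × Char) (ps : List (Char × Char)) (j : Nat) :
    pvMch (q :: ps) (j + 1) ↔ pvMch ps j := by
  simp [pvMch]

theorem pvRunLoop_iff (p : List (Char × Char)) (r : Nat) (hr : r < 32) :
    pvRunLoop p r = true ↔ (∃ i, pvWin p i) ∨ pvHead p r := by
  induction p generalizing r with
  | nil =>
    simp only [pvRunLoop, pvWin, pvHead, List.length_nil]
    constructor
    · intro h; exact absurd h (by simp)
    · rintro (⟨i, hi, _⟩ | ⟨hlen, _⟩) <;> omega
  | cons q ps ih =>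
    obtain ⟨a, b⟩ := q
    have hlc : ((a, b) :: ps).length = ps.length + 1 := List.length_cons ..
    by_cases hab : a = b
    · by_cases h32 : r + 1 = 32
      · constructor
        · intro _
          right
          refine ⟨by rw [hlc]; omega, ?_⟩
          intro j hj
          have hj0 : j = 0 := by omega
          subst hj0
          exact (pvMch_cons_zero a b ps).2 hab
        · intro _
          simp [pvRunLoop, hab, h32]
      · rw [show pvRunLoop ((a, b) :: ps) r = pvRunLoop ps (r + 1) by
            simp [pvRunLoop, hab, h32]]
        rw [ih (r + 1) (by omega)]
        constructor
        · rintro (⟨i, hi, hm⟩ | ⟨hlen, hm⟩)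
          · left
            refine ⟨i + 1, by rw [hlc]; omega, ?_⟩
            intro j hj
            rw [show i + 1 + j = (i + j) + 1 from by omega, pvMch_cons_succ]
            exact hm j hj
          · right
            refine ⟨by rw [hlc]; omega, ?_⟩
            intro j hj
            rcases j with _ | j
            · exact (pvMch_cons_zero a b ps).2 hab
            · rw [pvMch_cons_succ]; exact hm j (by omega)
        · rintro (⟨i, hi, hm⟩ | ⟨hlen, hm⟩)
          · rcases i with _ | i
            · right
              rw [hlc] at hi
              refine ⟨by omega, ?_⟩
              intro j hj
              have h := hm (j + 1) (by omega)
              rw [show (0 : Nat) + (j + 1) = j + 1 from by omega, pvMch_cons_succ] at h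
              exact h
            · left
              rw [hlc] at hi
              refine ⟨i, by omega, ?_⟩
              intro j hj
              have h := hm j hj
              rw [show i + 1 + j = (i + j) + 1 from by omega, pvMch_cons_succ] at h
              exact h
          · right
            rw [hlc] at hlen
            refine ⟨by omega, ?_⟩
            intro j hj
            have h := hm (j + 1) (by omega)
            rw [pvMch_cons_succ] at h
            exact h
    · rw [show pvRunLoop ((a, b) :: ps) r = pvRunLoop ps 0 by simp [pvRunLoop, hab]]
      rw [ih 0 (by omega)]
      constructor
      · rintro (⟨i, hi, hm⟩ | ⟨hlen, hm⟩)
        · left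
          refine ⟨i + 1, by rw [hlc]; omega, ?_⟩
          intro j hj
          rw [show i + 1 + j = (i + j) + 1 from by omega, pvMch_cons_succ]
          exact hm j hj
        · left
          refine ⟨1, by rw [hlc]; omega, ?_⟩
          intro j hj
          rw [show 1 + j = j + 1 from by omega, pvMch_cons_succ]
          exact hm j (by omega)
      · rintro (⟨i, hi, hm⟩ | ⟨hlen, hm⟩)
        · rcases i with _ | i
          · exfalso
            have h := hm 0 (by omega)
            rw [show (0 : Nat) + 0 = 0 from by omega, pvMch_cons_zero] at h
            exact hab h
          · left
            rw [hlc] at hi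
            refine ⟨i, by omega, ?_⟩
            intro j hj
            have h := hm j hj
            rw [show i + 1 + j = (i + j) + 1 from by omega, pvMch_cons_succ] at h
            exact h
        · exfalso
          have h := hm 0 (by omega)
          rw [pvMch_cons_zero] at h
          exact hab h

theorem pvLoop_spec (p : List (Char × Char)) :
    pvRunLoop p 0 = true ↔ ∃ i, pvWin p i := by
  rw [pvRunLoop_iff p 0 (by omega)]
  constructor
  · rintro (h | ⟨h1, h2⟩)
    · exact h
    · exact ⟨0, by simpa [pvWin] using ⟨by omega, h2⟩⟩
  · intro h; exact Or.inl h

-- window in the zip ↔ window of equal chars in the original list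
theorem pvWin_zip (l : List Char) (i : Nat) :
    pvWin (l.zip (l.drop 32)) i ↔ (i + 64 ≤ l.length ∧ ∀ j < 32, l[i + j]? = l[i + j + 32]?) := by
  have hzl : (l.zip (l.drop 32)).length = min l.length (l.length - 32) := by
    simp [List.length_zip]
  constructor
  · rintro ⟨h1, h2⟩
    rw [hzl] at h1
    refine ⟨by omega, ?_⟩
    intro j hj
    obtain ⟨c, hc⟩ := h2 j hj
    have hb : i + j < (l.zip (l.drop 32)).length := by rw [hzl]; omega
    rw [List.getElem?_eq_getElem hb, List.getElem_zip] at hc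
    have hcc := Option.some.inj hc
    have h3 : l[i + j]'(by omega) = c := congrArg Prod.fst hcc
    have h4 : (l.drop 32)[i + j]'(by simp; omega) = c := congrArg Prod.snd hcc
    have h5 : (l.drop 32)[i + j]? = some c := by
      rw [List.getElem?_eq_getElem (show i + j < (l.drop 32).length from by simp; omega)]
      exact congrArg some h4
    rw [List.getElem?_drop] at h5
    rw [List.getElem?_eq_getElem (show i + j < l.length from by omega),
        show i + j + 32 = 32 + (i + j) from by omega, h5]
    exact congrArg some h3
  · rintro ⟨h1, h2⟩
    refine ⟨by rw [hzl]; omega, ?_⟩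
    intro j hj
    have hb : i + j < (l.zip (l.drop 32)).length := by rw [hzl]; omega
    refine ⟨l[i + j]'(by omega), ?_⟩
    rw [List.getElem?_eq_getElem hb, List.getElem_zip]
    have h5 : (l.drop 32)[i + j]? = l[i + j]? := by
      rw [List.getElem?_drop, show 32 + (i + j) = i + j + 32 from by omega]
      exact (h2 j hj).symm
    rw [List.getElem?_eq_getElem (show i + j < (l.drop 32).length from by simp; omega),
        List.getElem?_eq_getElem (show i + j < l.length from by omega)] at h5
    have h6 := Option.some.inj h5
    exact congrArg some (by rw [Prod.mk.injEq]; exact ⟨rfl, h6⟩)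

-- A's chunk comparison, pointwise
theorem pvSliceEq (l : List Char) (i : Nat) :
    ((l.drop i).take 32 = (l.drop (i + 32)).take 32) ↔ ∀ j < 32, l[i + j]? = l[i + j + 32]? := by
  constructor
  · intro he j hj
    have hc := congrArg (fun t => t[j]?) he
    simp only [List.getElem?_take, if_pos hj, List.getElem?_drop] at hc
    rw [show i + j + 32 = i + 32 + j from by omega]
    exact hc
  · intro hm
    apply List.ext_getElem?
    intro m
    by_cases hm32 : m < 32
    · simp only [List.getElem?_take, if_pos hm32, List.getElem?_drop]
      have h2 := hm m hm32
      rw [show i + m + 32 = i + 32 + m from by omega] at h2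
      exact h2
    · simp only [List.getElem?_take, if_neg hm32]

-- the two slices of A, on the range's nonnegative indices
theorem pvSliceA (l : List Char) (k : Nat) :
    PySem.List.slice l (some (0 + (k:Int))) (some (0 + (k:Int) + 32)) = (l.drop k).take 32 := by
  rw [PySem.List.slice_toNat l (by omega) (by omega),
      show ((0:Int) + (k:Int)).toNat = k from by omega,
      show ((0:Int) + (k:Int) + 32).toNat = k + 32 from by omega]
  congr 1
  omega

theorem pvSliceB (l : List Char) (k : Nat) :
    PySem.List.slice l (some (0 + (k:Int) + 32)) (some (0 + (k:Int) + 64)) = (l.drop (k + 32)).take 32 := by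
  rw [PySem.List.slice_toNat l (by omega) (by omega),
      show ((0:Int) + (k:Int) + 32).toNat = k + 32 from by omega,
      show ((0:Int) + (k:Int) + 64).toNat = k + 64 from by omega]
  congr 1
  omega

theorem pvA_iff (l : List Char) :
    ((PySem.List.pyRange 0 ((l.length : Int) - 64 + 1) 1).any (fun i =>
      PySem.List.slice l (some i) (some (i + 32)) =
        PySem.List.slice l (some (i + 32)) (some (i + 64))) = true)
    ↔ ∃ k : Nat, k + 64 ≤ l.length ∧ ∀ j < 32, l[k + j]? = l[k + j + 32]? := by
  rw [PySem.List.pyRange_one, List.any_map, List.any_eq_true]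
  constructor
  · rintro ⟨k, hk, hp⟩
    rw [List.mem_range] at hk
    have h64 : k + 64 ≤ l.length := by omega
    refine ⟨k, h64, ?_⟩
    simp only [Function.comp_apply, pvSliceA, pvSliceB, decide_eq_true_eq] at hp
    exact (pvSliceEq l k).1 hp
  · rintro ⟨k, h64, hm⟩
    refine ⟨k, ?_, ?_⟩
    · rw [List.mem_range]; omega
    · simp only [Function.comp_apply, pvSliceA, pvSliceB, decide_eq_true_eq]
      exact (pvSliceEq l k).2 hm

-- ===== VERDICT (by name: the statement is the Claim_ definition above) =====
theorem contains_repeated_hex_spec : Claim_equal_contains_repeated_hex := by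
  intro text _
  unfold Spec_contains_repeated_hex contains_repeated_hex contains_repeated_hex_alt
  set l := (PySem.Str.lower text).toList.filter (fun c => ("0123456789abcdef".toList).contains c) with hl
  rw [Bool.eq_iff_iff, pvA_iff, pvLoop_spec]
  constructor
  · rintro ⟨k, hk⟩; exact ⟨k, (pvWin_zip l k).2 hk⟩
  · rintro ⟨k, hk⟩; exact ⟨k, (pvWin_zip l k).1 hk⟩
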